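-- pv_equiv track=rewrite | github.com/Runarok/GeeksForGeeks-solutions | Difficulty: Medium/Enemy/enemy.py | largestArea
-- ===== SOURCE A (Python) =====
-- from typing import List
--
-- def largestArea(n: int, m: int, k: int, enemy: List[List[int]]) -> int:
--     # Initialize lists to store enemy row and column positions
--     enemyRows = [-1]
--     enemyCols = [-1]
--
--     # Store enemy positions in separate lists for rows and columns
--     for i in range(k):
--         enemyRows.append(enemy[i][0] - 1)
--         enemyCols.append(enemy[i][1] - 1)
--
--     # Append the last row and column index to consider boundaries
--     enemyRows.append(n)
--     enemyCols.append(m)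
--
--     # Sort the row and column lists to process gaps efficiently
--     enemyRows.sort()
--     enemyCols.sort()
--
--     # Variables to store the maximum gap between consecutive enemy rows and columns
--     maxRowGap = 0
--     maxColGap = 0
--
--     # Calculate the maximum gap between consecutive enemy rows
--     for i in range(1, len(enemyRows)):
--         prevRow = enemyRows[i - 1]
--         currRow = enemyRows[i]
--         maxRowGap = max(maxRowGap, currRow - prevRow - 1)
--
--     # Calculate the maximum gap between consecutive enemy columns
--     for i in range(1, len(enemyCols)):
--         prevCol = enemyCols[i - 1]
--         currCol = enemyCols[i]
--         maxColGap = max(maxColGap, currCol - prevCol - 1)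
--
--     # The largest possible area is the product of the largest row and column gaps
--     return maxRowGap * maxColGap
-- ===== SOURCE B (Python) =====
-- from typing import List
--
--
-- def _maxFreeRun(vals: List[int]) -> int:
--     # Largest number of integers strictly between some value and the least
--     # value above it -- computed without sorting: for each value, find the
--     # minimum of the values greater than it.
--     best = 0
--     for v in vals:
--         above = [w for w in vals if w > v]
--         if above:
--             best = max(best, min(above) - v - 1)
--     return best
--
--
-- def largestArea(n: int, m: int, k: int, enemy: List[List[int]]) -> int:
--     rows = [-1] + [enemy[i][0] - 1 for i in range(k)] + [n]
--     cols = [-1] + [enemy[i][1] - 1 for i in range(k)] + [m]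
--     return _maxFreeRun(rows) * _maxFreeRun(cols)
-- ===== Notes on version B (the rewrite author's own statement) =====
-- stated objective: alternative
-- what changed: A sorts the sentinel-extended row/column lists and scans adjacent pairs for the largest gap; B never sorts: for each boundary value it takes the minimum of the values strictly above it (a nested scan) and maximises that gap directly.
import Mathlib
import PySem

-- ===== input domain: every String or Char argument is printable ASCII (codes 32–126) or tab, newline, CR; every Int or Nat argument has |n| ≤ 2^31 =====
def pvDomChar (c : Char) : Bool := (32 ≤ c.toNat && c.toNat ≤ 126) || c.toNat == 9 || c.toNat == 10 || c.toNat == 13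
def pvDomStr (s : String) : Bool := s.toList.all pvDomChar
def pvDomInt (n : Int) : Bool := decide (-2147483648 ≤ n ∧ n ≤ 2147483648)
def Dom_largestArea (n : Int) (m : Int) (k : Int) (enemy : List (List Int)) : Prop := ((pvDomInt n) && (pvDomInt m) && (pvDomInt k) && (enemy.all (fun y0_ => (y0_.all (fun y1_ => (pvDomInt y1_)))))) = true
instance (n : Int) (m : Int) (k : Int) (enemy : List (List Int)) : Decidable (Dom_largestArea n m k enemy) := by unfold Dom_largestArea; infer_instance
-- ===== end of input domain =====

-- B replaces A's sort-then-adjacent-scan by an unsorted nested scan (min of the values above each value); equal on all inputs where A returns.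

-- ===== PORT A =====
def largestArea (n : Int) (m : Int) (k : Int) (enemy : List (List Int)) : Int :=
  -- enemyRows = [-1]; enemyCols = [-1]; for i in range(k): append enemy[i][0]-1 / enemy[i][1]-1
  let rc : List Int × List Int :=
    (PySem.List.pyRange 0 k 1).foldl
      (fun (p : List Int × List Int) i =>
        (p.1 ++ [PySem.List.pyGetD (PySem.List.pyGetD enemy i []) 0 0 - 1],
         p.2 ++ [PySem.List.pyGetD (PySem.List.pyGetD enemy i []) 1 0 - 1]))
      ([-1], [-1])
  let enemyRows := rc.1 ++ [n]
  let enemyCols := rc.2 ++ [m]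
  let enemyRows := PySem.List.sorted enemyRows (fun x => x) false
  let enemyCols := PySem.List.sorted enemyCols (fun x => x) false
  let maxRowGap :=
    (PySem.List.pyRange 1 (enemyRows.length : Int) 1).foldl
      (fun g i => max g (PySem.List.pyGetD enemyRows i 0 - PySem.List.pyGetD enemyRows (i - 1) 0 - 1)) 0
  let maxColGap :=
    (PySem.List.pyRange 1 (enemyCols.length : Int) 1).foldl
      (fun g i => max g (PySem.List.pyGetD enemyCols i 0 - PySem.List.pyGetD enemyCols (i - 1) 0 - 1)) 0
  maxRowGap * maxColGap

-- ===== PORT B =====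
-- helper _maxFreeRun from Source B
def pvMaxFreeRun (vals : List Int) : Int :=
  vals.foldl
    (fun best v =>
      let above := vals.filter (fun w => v < w)
      match PySem.List.min? above (fun x => x) with
      | none => best
      | some mn => max best (mn - v - 1))
    0

def largestArea_alt (n : Int) (m : Int) (k : Int) (enemy : List (List Int)) : Int :=
  let rows := -1 :: ((PySem.List.pyRange 0 k 1).map
      (fun i => PySem.List.pyGetD (PySem.List.pyGetD enemy i []) 0 0 - 1) ++ [n])
  let cols := -1 :: ((PySem.List.pyRange 0 k 1).map
      (fun i => PySem.List.pyGetD (PySem.List.pyGetD enemy i []) 1 0 - 1) ++ [m])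
  pvMaxFreeRun rows * pvMaxFreeRun cols

-- ===== PRECONDITION & SPEC =====
-- Pre_ = exactly the inputs A returns on: the first k rows of enemy exist and have ≥ 2 entries (else A raises IndexError).
def Pre_largestArea (n : Int) (m : Int) (k : Int) (enemy : List (List Int)) : Prop :=
  k ≤ (enemy.length : Int) ∧ ∀ row ∈ enemy.take k.toNat, 2 ≤ row.length
instance (n : Int) (m : Int) (k : Int) (enemy : List (List Int)) : Decidable (Pre_largestArea n m k enemy) := by unfold Pre_largestArea; infer_instance

def pvWitness_largestArea : Int × Int × Int × List (List Int) := (5, 4, 2, [[2, 2], [4, 3]])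

def Spec_largestArea (n : Int) (m : Int) (k : Int) (enemy : List (List Int)) (out : Int) : Prop := out = largestArea_alt n m k enemy
instance (n : Int) (m : Int) (k : Int) (enemy : List (List Int)) (out : Int) : Decidable (Spec_largestArea n m k enemy out) := by unfold Spec_largestArea; infer_instance

-- ===== CLAIM (what is proved, stated in full; the proofs are below) =====
def Claim_equal_largestArea : Prop := ∀ (n : Int) (m : Int) (k : Int) (enemy : List (List Int)), Dom_largestArea n m k enemy → Pre_largestArea n m k enemy → Spec_largestArea n m k enemy (largestArea n m k enemy)

-- ===== LEMMAS AND PROOFS =====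

-- A's adjacent-gap loop, structurally
def pvPairFold : List Int → Int → Int
  | a :: b :: t, g => pvPairFold (b :: t) (max g (b - a - 1))
  | _, g => g

-- the candidate B computes for one value v over base list L
def pvCand (L : List Int) (v : Int) : Int :=
  match PySem.List.min? (L.filter (fun w => v < w)) (fun x => x) with
  | none => 0
  | some mn => mn - v - 1

-- B's fold equals the max-fold of pvCand (for a nonnegative accumulator)
lemma pvMaxFreeRun_body (L M : List Int) (g : Int) (hg : 0 ≤ g) :
    M.foldl
      (fun best v =>
        let above := L.filter (fun w => v < w)
        match PySem.List.min? above (fun x => x) with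
        | none => best
        | some mn => max best (mn - v - 1)) g
    = M.foldl (fun b v => max b (pvCand L v)) g := by
  induction M generalizing g with
  | nil => rfl
  | cons v t ih =>
    simp only [List.foldl_cons]
    cases h : PySem.List.min? (L.filter (fun w => v < w)) (fun x => x) with
    | none =>
      have hc : pvCand L v = 0 := by unfold pvCand; rw [h]
      rw [hc]
      rw [max_eq_left hg]
      exact ih g hg
    | some mn =>
      have hc : pvCand L v = mn - v - 1 := by unfold pvCand; rw [h]
      simp only [hc]
      exact ih _ (le_trans hg (le_max_left _ _))

-- min? with the identity key is permutation-invariant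
lemma pvMin?_perm {l₁ l₂ : List Int} (h : l₁.Perm l₂) :
    PySem.List.min? l₁ (fun x => x) = PySem.List.min? l₂ (fun x => x) := by
  cases h1 : PySem.List.min? l₁ (fun x => x) with
  | none =>
    rw [PySem.List.min?_eq_none_iff] at h1
    subst h1
    have h2 : l₂ = [] := List.Perm.eq_nil h.symm
    subst h2
    rfl
  | some m1 =>
    cases h2 : PySem.List.min? l₂ (fun x => x) with
    | none =>
      rw [PySem.List.min?_eq_none_iff] at h2
      subst h2
      have h1' : l₁ = [] := List.Perm.eq_nil h
      subst h1'
      have := PySem.List.min?_mem h1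
      simp at this
    | some m2 =>
      have hm1 := PySem.List.min?_mem h1
      have hm2 := PySem.List.min?_mem h2
      have e1 : m1 ≤ m2 := by simpa using PySem.List.min?_isMin h1 m2 (h.mem_iff.mpr hm2)
      have e2 : m2 ≤ m1 := by simpa using PySem.List.min?_isMin h2 m1 (h.mem_iff.mp hm1)
      rw [le_antisymm e1 e2]

lemma pvCand_perm {L L' : List Int} (h : L.Perm L') (v : Int) : pvCand L v = pvCand L' v := by
  unfold pvCand
  rw [pvMin?_perm (h.filter _)]

-- the max-fold of pvCand is permutation-invariant in the iteration list
lemma pvGfold_perm (L : List Int) {M M' : List Int} (h : M.Perm M') (g : Int) :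
    M.foldl (fun b v => max b (pvCand L v)) g = M'.foldl (fun b v => max b (pvCand L v)) g :=
  List.Perm.foldl_eq
    (rcomm := ⟨fun b x y => by simp [max_assoc, max_comm (pvCand L x) (pvCand L y)]⟩) h g

-- key step: on a ≤-sorted list the pvCand max-fold is the adjacent-gap fold
lemma pvSorted_gfold (S : List Int) (hs : S.Pairwise (· ≤ ·)) (g : Int) (hg : 0 ≤ g) :
    S.foldl (fun b v => max b (pvCand S v)) g = pvPairFold S g := by
  induction S generalizing g with
  | nil => rfl
  | cons a T ih =>
    cases T with
    | nil =>
      have hc : pvCand [a] a = 0 := by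
        unfold pvCand
        rw [show List.filter (fun w => decide (a < w)) [a] = [] by simp]
        rfl
      simp [pvPairFold, hc, max_eq_left hg]
    | cons b t =>
      have hab : a ≤ b := (List.pairwise_cons.mp hs).1 b (by simp)
      have hat : ∀ y ∈ b :: t, a ≤ y := (List.pairwise_cons.mp hs).1
      have hs' : (b :: t).Pairwise (· ≤ ·) := (List.pairwise_cons.mp hs).2
      -- the head can be dropped from the filter base for every tail element
      have hdrop : ∀ v ∈ b :: t, pvCand (a :: b :: t) v = pvCand (b :: t) v := by
        intro v hv
        unfold pvCand
        rw [show List.filter (fun w => decide (v < w)) (a :: b :: t)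
            = List.filter (fun w => decide (v < w)) (b :: t) by
          have : ¬ v < a := by have := hat v hv; omega
          simp [List.filter_cons, this]]
      have htail : ∀ x : Int,
          (b :: t).foldl (fun bb v => max bb (pvCand (a :: b :: t) v)) x
          = (b :: t).foldl (fun bb v => max bb (pvCand (b :: t) v)) x := by
        intro x
        apply PySem.List.foldl_congr_mem
        intro acc v hv
        rw [hdrop v hv]
      by_cases hlt : a < b
      · -- head candidate is exactly the first adjacent gap
        have hcand : pvCand (a :: b :: t) a = b - a - 1 := by
          unfold pvCand
          rw [show List.filter (fun w => decide (a < w)) (a :: b :: t)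
              = b :: List.filter (fun w => decide (a < w)) t by
            simp [hlt]]
          cases hmm : PySem.List.min? (b :: List.filter (fun w => decide (a < w)) t) (fun x => x) with
          | none => simp [PySem.List.min?_eq_none_iff] at hmm
          | some mv =>
            have hmem := PySem.List.min?_mem hmm
            have h1 : mv ≤ b := by simpa using PySem.List.min?_isMin hmm b (by simp)
            have h2 : b ≤ mv := by
              rcases List.mem_cons.mp hmem with h | h
              · omega
              · exact (List.pairwise_cons.mp hs').1 mv (List.mem_of_mem_filter h)
            rw [le_antisymm h1 h2]
        calc (a :: b :: t).foldl (fun bb v => max bb (pvCand (a :: b :: t) v)) g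
            = (b :: t).foldl (fun bb v => max bb (pvCand (a :: b :: t) v))
                (max g (pvCand (a :: b :: t) a)) := rfl
          _ = (b :: t).foldl (fun bb v => max bb (pvCand (b :: t) v)) (max g (b - a - 1)) := by
                rw [hcand, htail]
          _ = pvPairFold (b :: t) (max g (b - a - 1)) :=
                ih hs' _ (le_trans hg (le_max_left _ _))
          _ = pvPairFold (a :: b :: t) g := rfl
      · -- a = b: the duplicate head's candidate is the next element's, absorbed by max
        have hab' : a = b := by omega
        have hcand : pvCand (a :: b :: t) a = pvCand (b :: t) b := by
          rw [show pvCand (a :: b :: t) a = pvCand (a :: b :: t) b by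
            unfold pvCand; rw [hab']]
          exact hdrop b (by simp)
        have habs : max (max g (pvCand (b :: t) b)) (pvCand (b :: t) b)
            = max g (pvCand (b :: t) b) := by rw [max_assoc, max_self]
        calc (a :: b :: t).foldl (fun bb v => max bb (pvCand (a :: b :: t) v)) g
            = (b :: t).foldl (fun bb v => max bb (pvCand (a :: b :: t) v))
                (max g (pvCand (a :: b :: t) a)) := rfl
          _ = (b :: t).foldl (fun bb v => max bb (pvCand (b :: t) v))
                (max g (pvCand (b :: t) b)) := by rw [hcand, htail]
          _ = t.foldl (fun bb v => max bb (pvCand (b :: t) v))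
                (max (max g (pvCand (b :: t) b)) (pvCand (b :: t) b)) := rfl
          _ = t.foldl (fun bb v => max bb (pvCand (b :: t) v))
                (max g (pvCand (b :: t) b)) := by rw [habs]
          _ = (b :: t).foldl (fun bb v => max bb (pvCand (b :: t) v)) g := rfl
          _ = pvPairFold (b :: t) g := ih hs' g hg
          _ = pvPairFold (a :: b :: t) g := by
                simp [pvPairFold, show max g (b - a - 1) = g by omega]

-- the Nat-indexed adjacent-gap loop is the structural pair fold
lemma pvNatIdxFold (S : List Int) (g : Int) :
    (List.range (S.length - 1)).foldl
      (fun g j => max g (S.getD (j + 1) 0 - S.getD j 0 - 1)) g = pvPairFold S g := by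
  induction S generalizing g with
  | nil => rfl
  | cons a T ih =>
    cases T with
    | nil => rfl
    | cons b t =>
      have hlen : (a :: b :: t).length - 1 = (b :: t).length - 1 + 1 := by simp
      rw [hlen, List.range_succ_eq_map, List.foldl_cons, List.foldl_map]
      simp only [Nat.succ_eq_add_one, List.getD_cons_succ, List.getD_cons_zero] at ih ⊢
      rw [show pvPairFold (a :: b :: t) g = pvPairFold (b :: t) (max g (b - a - 1)) from rfl]
      exact ih _

-- A's pyRange-indexed loop over a list is the structural pair fold
lemma pvIdxFold (S : List Int) (g : Int) :
    (PySem.List.pyRange 1 (S.length : Int) 1).foldl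
      (fun g i => max g (PySem.List.pyGetD S i 0 - PySem.List.pyGetD S (i - 1) 0 - 1)) g
    = pvPairFold S g := by
  rw [PySem.List.pyRange_one, List.foldl_map]
  have hbody : ∀ (x : Int),
      (List.range (((S.length : Int) - 1).toNat)).foldl
        (fun (g : Int) (k : Nat) => max g (PySem.List.pyGetD S (1 + (k : Int)) 0
          - PySem.List.pyGetD S (1 + (k : Int) - 1) 0 - 1)) x
      = (List.range (((S.length : Int) - 1).toNat)).foldl
        (fun g j => max g (S.getD (j + 1) 0 - S.getD j 0 - 1)) x := by
    intro x
    apply PySem.List.foldl_congr_mem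
    intro acc j _
    rw [show (1 + (j : Int)) = ((j + 1 : Nat) : Int) by push_cast; omega,
        show ((j + 1 : Nat) : Int) - 1 = ((j : Nat) : Int) by push_cast; omega,
        PySem.List.pyGetD_natCast, PySem.List.pyGetD_natCast]
  rw [hbody]
  rw [show ((S.length : Int) - 1).toNat = S.length - 1 by omega]
  exact pvNatIdxFold S g

-- pvMaxFreeRun L = pvPairFold (sorted L) 0
lemma pvMaxFreeRun_eq_pairFold_sorted (L : List Int) :
    pvMaxFreeRun L = pvPairFold (PySem.List.sorted L (fun x => x) false) 0 := by
  set S := PySem.List.sorted L (fun x => x) false with hS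
  have hperm : S.Perm L := PySem.List.sorted_perm L (fun x => x) false
  unfold pvMaxFreeRun
  rw [pvMaxFreeRun_body L L 0 le_rfl]
  have h1 : L.foldl (fun b v => max b (pvCand L v)) 0
      = S.foldl (fun b v => max b (pvCand L v)) 0 := pvGfold_perm L hperm.symm 0
  have h2 : S.foldl (fun b v => max b (pvCand L v)) 0
      = S.foldl (fun b v => max b (pvCand S v)) 0 := by
    apply PySem.List.foldl_congr_mem
    intro acc v _
    rw [pvCand_perm hperm v]
  rw [h1, h2]
  exact pvSorted_gfold S (by simpa [hS] using PySem.List.sorted_pairwise L (fun x => x)) 0 le_rfl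

-- ===== VERDICT (by name: the statement is the Claim_ definition above) =====
theorem largestArea_spec : Claim_equal_largestArea := by
  intro n m k enemy _ _
  unfold Spec_largestArea largestArea largestArea_alt
  rw [PySem.List.foldl_prod_mk
    (f := fun acc i => acc ++ [PySem.List.pyGetD (PySem.List.pyGetD enemy i []) 0 0 - 1])
    (g := fun acc i => acc ++ [PySem.List.pyGetD (PySem.List.pyGetD enemy i []) 1 0 - 1])]
  simp only [PySem.List.foldl_append_singleton_eq_map]
  rw [pvIdxFold, pvIdxFold,
      pvMaxFreeRun_eq_pairFold_sorted, pvMaxFreeRun_eq_pairFold_sorted]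
  rfl
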